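-- pv_equiv track=rewrite | github.com/L-1124/terminal-qrcode | src/terminal_qrcode/_renderers.py | _choose_scale_area_mode
-- ===== SOURCE A (Python) =====
-- import math
--
-- _HALFBLOCK_MAX_SCALE = 10
--
-- def _choose_scale_area_mode(base_w: int, base_h: int, avail_cols: int, avail_rows: int) -> int:
--     """为面积优先模式选择可用整数 scale（仅允许偶数，且满足精确行高预算）."""
--     if base_w <= 0 or base_h <= 0:
--         return 1
--     max_by_width = avail_cols // base_w
--     max_by_rows = (2 * avail_rows) // base_h
--     s_max = max(1, min(max_by_width, max_by_rows, _HALFBLOCK_MAX_SCALE))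
--     if s_max < 2:
--         return 1
--     if s_max % 2 != 0:
--         s_max -= 1
--     while s_max >= 2:
--         if (base_w * s_max) <= avail_cols and math.ceil((base_h * s_max) / 2) <= avail_rows:
--             return s_max
--         s_max -= 2
--     return 1
-- ===== SOURCE B (Python) =====
-- def _choose_scale_area_mode(base_w: int, base_h: int, avail_cols: int, avail_rows: int) -> int:
--     """Closed form: the largest even scale in [2,10] within both budgets, else 1."""
--     if base_w <= 0 or base_h <= 0:
--         return 1
--     s = min(avail_cols // base_w, (2 * avail_rows) // base_h, 10)
--     if s < 2:
--         return 1
--     return s - s % 2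
-- ===== Notes on version B (the rewrite author's own statement) =====
-- stated objective: simpler
-- what changed: Replaced the downward while-loop search with a direct closed form: since s_max already satisfies both the width and the exact-row budget, the loop always returns on its first iteration, so B just returns s_max rounded down to even (or 1).
import Mathlib
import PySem

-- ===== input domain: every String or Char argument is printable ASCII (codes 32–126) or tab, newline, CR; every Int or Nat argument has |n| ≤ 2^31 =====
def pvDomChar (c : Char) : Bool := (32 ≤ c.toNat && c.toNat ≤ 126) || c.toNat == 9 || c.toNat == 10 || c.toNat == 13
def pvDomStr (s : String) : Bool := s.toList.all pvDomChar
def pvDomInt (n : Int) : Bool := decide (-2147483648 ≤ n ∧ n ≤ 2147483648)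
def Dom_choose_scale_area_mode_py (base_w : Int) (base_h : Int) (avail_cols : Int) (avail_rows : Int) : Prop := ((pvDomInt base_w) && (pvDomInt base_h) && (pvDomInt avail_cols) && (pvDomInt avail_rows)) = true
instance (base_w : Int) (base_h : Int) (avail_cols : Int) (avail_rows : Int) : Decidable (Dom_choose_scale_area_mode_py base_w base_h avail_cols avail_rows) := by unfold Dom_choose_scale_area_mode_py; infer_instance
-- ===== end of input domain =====

-- B removes A's downward while-loop: s_max already meets both budgets, so B returns s_max rounded down to even directly (objective: simpler).
-- ===== PORT A =====
-- the while-loop of A; math.ceil((base_h*s)/2) is exact ceiling division on Dom (product < 2^53), ported as -((-x) // 2)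
def chooseScaleLoopA (base_w : Int) (base_h : Int) (avail_cols : Int) (avail_rows : Int) (s_max : Int) : Int :=
  if h : 2 ≤ s_max then
    if base_w * s_max ≤ avail_cols ∧ -(PySem.Int.floordiv (-(base_h * s_max)) 2) ≤ avail_rows then
      s_max
    else
      chooseScaleLoopA base_w base_h avail_cols avail_rows (s_max - 2)
  else 1
termination_by s_max.toNat
decreasing_by omega

def choose_scale_area_mode_py (base_w : Int) (base_h : Int) (avail_cols : Int) (avail_rows : Int) : Int :=
  if base_w ≤ 0 ∨ base_h ≤ 0 then 1
  else
    let max_by_width := PySem.Int.floordiv avail_cols base_w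
    let max_by_rows := PySem.Int.floordiv (2 * avail_rows) base_h
    let s_max := max 1 (min max_by_width (min max_by_rows 10))
    if s_max < 2 then 1
    else
      let s_max := if PySem.Int.mod s_max 2 ≠ 0 then s_max - 1 else s_max
      chooseScaleLoopA base_w base_h avail_cols avail_rows s_max

-- ===== PORT B =====
def choose_scale_area_mode_py_alt (base_w : Int) (base_h : Int) (avail_cols : Int) (avail_rows : Int) : Int :=
  if base_w ≤ 0 ∨ base_h ≤ 0 then 1
  else
    let s := min (PySem.Int.floordiv avail_cols base_w) (min (PySem.Int.floordiv (2 * avail_rows) base_h) 10)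
    if s < 2 then 1
    else s - PySem.Int.mod s 2

-- ===== PRECONDITION & SPEC =====
def Spec_choose_scale_area_mode_py (base_w : Int) (base_h : Int) (avail_cols : Int) (avail_rows : Int) (out : Int) : Prop := out = choose_scale_area_mode_py_alt base_w base_h avail_cols avail_rows
instance (base_w : Int) (base_h : Int) (avail_cols : Int) (avail_rows : Int) (out : Int) : Decidable (Spec_choose_scale_area_mode_py base_w base_h avail_cols avail_rows out) := by unfold Spec_choose_scale_area_mode_py; infer_instance

-- ===== CLAIM (what is proved, stated in full; the proofs are below) =====
def Claim_equal_choose_scale_area_mode_py : Prop := ∀ (base_w : Int) (base_h : Int) (avail_cols : Int) (avail_rows : Int), Dom_choose_scale_area_mode_py base_w base_h avail_cols avail_rows → Spec_choose_scale_area_mode_py base_w base_h avail_cols avail_rows (choose_scale_area_mode_py base_w base_h avail_cols avail_rows)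

-- ===== LEMMAS AND PROOFS =====

-- ===== VERDICT (by name: the statement is the Claim_ definition above) =====
theorem choose_scale_area_mode_py_spec : Claim_equal_choose_scale_area_mode_py := by
  intro bw bh ac ar _
  unfold Spec_choose_scale_area_mode_py choose_scale_area_mode_py choose_scale_area_mode_py_alt
  by_cases hneg : bw ≤ 0 ∨ bh ≤ 0
  · simp [hneg]
  · simp only [if_neg hneg]
    push Not at hneg
    obtain ⟨hw, hh⟩ := hneg
    set w := PySem.Int.floordiv ac bw with hwdef
    set r := PySem.Int.floordiv (2 * ar) bh with hrdef
    set m := min w (min r 10) with hmdef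
    by_cases hlt : m < 2
    · have h1 : max 1 m < 2 := by omega
      simp only [if_pos h1, if_pos hlt]
    · push Not at hlt
      have hmax : max 1 m = m := by omega
      rw [hmax]
      rw [if_neg (by omega : ¬ m < 2), if_neg (by omega : ¬ m < 2)]
      have hmod : PySem.Int.mod m 2 = m % 2 :=
        PySem.Int.mod_eq_emod_of_pos (by norm_num)
      have hm2 := Int.emod_two_eq m
      set s := if PySem.Int.mod m 2 ≠ 0 then m - 1 else m with hsdef
      have hse : s = m - PySem.Int.mod m 2 := by
        rw [hsdef, hmod]; split_ifs with h <;> omega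
      have hs2 : 2 ≤ s := by rw [hse, hmod]; omega
      have hsm : s ≤ m := by rw [hse, hmod]; omega
      have hsw : s ≤ w := le_trans hsm (by omega)
      have hsr : s ≤ r := le_trans hsm (by omega)
      have hwb : bw * s ≤ ac := by
        have := (PySem.Int.le_floordiv_iff_mul_le (q := s) (a := ac) hw).mp (hwdef ▸ hsw)
        linarith [this, mul_comm s bw]
      have hrow : bh * s ≤ 2 * ar := by
        have := (PySem.Int.le_floordiv_iff_mul_le (q := s) (a := 2 * ar) hh).mp (hrdef ▸ hsr)
        linarith [this, mul_comm s bh]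
      have hceil : -(PySem.Int.floordiv (-(bh * s)) 2) ≤ ar := by
        have h2 : (-ar) ≤ PySem.Int.floordiv (-(bh * s)) 2 :=
          (PySem.Int.le_floordiv_iff_mul_le (q := -ar) (a := -(bh * s)) (by norm_num)).mpr
            (by linarith)
        linarith
      rw [chooseScaleLoopA]
      rw [dif_pos hs2, if_pos ⟨hwb, hceil⟩, hse]
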